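-- pv_equiv track=rewrite | github.com/JJMLG/JJMLG | 05.28 ~ 06.04 6월 첫째주/D - 옹알이(2)/혜진.py | solution
-- ===== SOURCE A (Python) =====
-- def solution(babbling):
--     ans = 0
--     for bab in babbling:
--         for speak in ["aya", "ye", "woo", "ma"]:
--             if speak * 2 in bab:            # 반복되는게 있으면 말할수없음.
--                 break
--             bab = bab.replace(speak, 'X')   # 말했다는 표시로 'X'한다. 앞 뒤로 같은게 반복될 수 있으니까 '' 빈 문자열이 아닌 것으로 바꿈.
--         if bab.count('X') == len(bab):      # 전부 'X'가 되면 ans++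
--             ans += 1
--     return ans
-- ===== SOURCE B (Python) =====
-- def solution(babbling):
--     # Single left-to-right pass per word: the four sounds start with distinct
--     # letters, so the next sound is determined by the current character.
--     sounds = {'a': 'aya', 'y': 'ye', 'w': 'woo', 'm': 'ma'}
--     ans = 0
--     for word in babbling:
--         i, prev, ok = 0, '', True
--         while i < len(word):
--             s = sounds.get(word[i])
--             if s is None or s == prev or word[i:i + len(s)] != s:
--                 ok = False
--                 break
--             prev = s
--             i += len(s)
--         if ok:
--             ans += 1
--     return ans
-- ===== Notes on version B (the rewrite author's own statement) =====
-- stated objective: faster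
-- what changed: Replaced A's four global replace-with-sentinel passes (plus doubled-sound substring scans) by a single deterministic left-to-right parse per word: the four sounds start with distinct letters, so one pass consuming sound by sound while remembering the previous sound decides pronounceability, with an early exit at the first impossible position.
-- intended difference: On lists containing a word that has the literal character 'X' in it yet decomposes into blocks from {aya, ye, woo, ma, 'X'} with no sound repeated consecutively (e.g. ["X"]), A counts that word as pronounceable because 'X' is the sentinel A itself substitutes for spoken sounds, so A returns a strictly larger count, while B counts only genuine sound sequences; B's value is the intended one since 'X' is not a pronounceable sound. — e.g. on solution(["X"]): A returns 1, B returns 0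
import Mathlib
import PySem

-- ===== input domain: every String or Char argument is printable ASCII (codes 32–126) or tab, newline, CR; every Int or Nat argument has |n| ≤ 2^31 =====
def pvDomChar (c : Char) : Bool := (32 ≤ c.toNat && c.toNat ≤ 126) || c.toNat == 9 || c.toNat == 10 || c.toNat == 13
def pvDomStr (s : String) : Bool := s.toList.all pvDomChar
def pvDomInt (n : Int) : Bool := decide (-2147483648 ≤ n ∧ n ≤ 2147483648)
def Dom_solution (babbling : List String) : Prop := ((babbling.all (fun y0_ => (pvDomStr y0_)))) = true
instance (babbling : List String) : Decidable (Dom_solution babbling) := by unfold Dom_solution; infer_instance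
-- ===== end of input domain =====

-- B replaces A's four global replace-with-'X'-sentinel passes by a single deterministic
-- left-to-right parse per word (the four sounds start with distinct letters); on words that
-- contain the literal character 'X' and tile into sound and 'X' blocks, A's sentinel makes it
-- count them as pronounceable — B returns the intended count there (see D_solution below).

def AYA : List Char := ['a', 'y', 'a']
def YE : List Char := ['y', 'e']
def WOO : List Char := ['w', 'o', 'o']
def MA : List Char := ['m', 'a']

-- ===== PORT A =====
-- the inner 'for speak in [...]' loop with its break: if speak*2 occurs, stop (bab as it is),
-- else replace every occurrence of speak by 'X' and go on to the next speak
def aloop : List (List Char) → List Char → List Char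
  | [], bab => bab
  | speak :: rest, bab =>
    if PySem.Chars.isIn (speak ++ speak) bab then bab
    else aloop rest (PySem.Chars.replace bab speak ['X'])

def solution (babbling : List String) : Int :=
  babbling.foldl (fun ans bab =>
    let b := aloop [AYA, YE, WOO, MA] bab.toList
    if PySem.Chars.count b ['X'] = b.length then ans + 1 else ans) 0

-- ===== PORT B =====
-- B's dict: the sound determined by its first character
def bsound : Char → Option (List Char)
  | 'a' => some AYA
  | 'y' => some YE
  | 'w' => some WOO
  | 'm' => some MA
  | _ => none

-- B's while loop: look the next sound up by the current character, check it is not the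
-- previous sound and that it actually occurs here, then advance past it
-- (fuel-bounded recursion, fuel := word length, exactly as PySem's own loop primitives)
def bloopF : Nat → List Char → List Char → Bool
  | _, _, [] => true
  | 0, _, _ :: _ => false
  | fuel + 1, p, c :: r =>
    match bsound c with
    | none => false
    | some s =>
      if s = p then false
      else if s.isPrefixOf (c :: r) then bloopF fuel s ((c :: r).drop s.length)
      else false

def bloop (p w : List Char) : Bool := bloopF w.length p w

def solution_alt (babbling : List String) : Int :=
  babbling.foldl (fun ans w => if bloop [] w.toList then ans + 1 else ans) 0

-- ===== PRECONDITION & SPEC =====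

-- The affected words form a regular language, stated by its 12-state automaton as a packed
-- transition table: 11 rows of width 8 for states 0-10 (0: between blocks, 1-4: between blocks
-- remembering which sound just ended, 5-10: inside a sound, B = 11: dead), columns
-- 'X a y e w o m' plus a dead-column for any other character; accepting states are 0-4.
def dfaStep (q : Nat) (c : Char) : Nat :=
  "0123456789AB".toList.idxOf
    ("057B8BAB0B7B8BAB05BB8BAB057BBBAB057B8BBBBB6BBBBBB1BBBBBBBBB2BBBBBBBBB9BBBBBBB3BBB4BBBBBB".toList.getD
      (q * 8 + "Xayewom".toList.idxOf c) 'B')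

-- On lists containing a word that has the literal character 'X' in it yet decomposes into
-- blocks from {aya, ye, woo, ma, 'X'} with no sound repeated consecutively (e.g. ["X"]),
-- A counts that word as pronounceable because 'X' is the sentinel A itself
-- substitutes for spoken sounds, so A returns a strictly larger count; B counts only genuine
-- sound sequences, which is the intended behaviour ('X' is not a pronounceable sound).
def D_solution (babbling : List String) : Prop :=
  ∃ w ∈ babbling, 'X' ∈ w.toList ∧ List.foldl dfaStep 0 w.toList ≤ 4

instance (babbling : List String) : Decidable (D_solution babbling) := by
  unfold D_solution; infer_instance

def Spec_solution (babbling : List String) (out : Int) : Prop :=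
  ¬ D_solution babbling → out = solution_alt babbling
instance (babbling : List String) (out : Int) : Decidable (Spec_solution babbling out) := by
  unfold Spec_solution; infer_instance

def pvDiffWitness_solution : List String := ["X"]
def pvDiffWitnessOut_solution : Int × Int := (1, 0)

-- ===== CLAIM (what is proved, stated in full; the proofs are below) =====
def Claim_unchanged_solution : Prop := ∀ (babbling : List String), Dom_solution babbling → Spec_solution babbling (solution babbling)
def Claim_changed_solution : Prop := Dom_solution (pvDiffWitness_solution) ∧ D_solution (pvDiffWitness_solution) ∧ solution (pvDiffWitness_solution) = pvDiffWitnessOut_solution.1 ∧ solution_alt (pvDiffWitness_solution) = pvDiffWitnessOut_solution.2 ∧ pvDiffWitnessOut_solution.1 ≠ pvDiffWitnessOut_solution.2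
def Claim_exact_solution : Prop := ∀ (babbling : List String), Dom_solution babbling → D_solution babbling → solution babbling ≠ solution_alt babbling

-- ===== LEMMAS AND PROOFS =====

-- the sounds still admissible at stage k of A's cascade (stage k has already replaced the
-- first k sounds by 'X'); used only to state D_solution and inside the proofs
def stageSound (k : Nat) (c : Char) : Option (List Char) :=
  match c with
  | 'a' => if k ≤ 0 then some AYA else none
  | 'y' => if k ≤ 1 then some YE else none
  | 'w' => if k ≤ 2 then some WOO else none
  | 'm' => if k ≤ 3 then some MA else none
  | _ => none

-- w tiles into blocks from {stage-k sounds, the single letter 'X'} with no sound block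
-- immediately repeated (p = the previous block; fuel := word length)
def tfF (k : Nat) : Nat → List Char → List Char → Bool
  | _, _, [] => true
  | 0, _, _ :: _ => false
  | fuel + 1, p, c :: r =>
    if c = 'X' then tfF k fuel ['X'] r
    else
      match stageSound k c with
      | none => false
      | some s => !(s == p) && s.isPrefixOf (c :: r) && tfF k fuel s ((c :: r).drop s.length)

def tf (k : Nat) (p w : List Char) : Bool := tfF k w.length p w

theorem stageSound_some_pos (k : Nat) (c : Char) (s : List Char) (h : stageSound k c = some s) :
    0 < s.length := by
  unfold stageSound at h
  split at h <;> (try split at h) <;>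
    first
      | (injection h with h2; subst h2; simp [AYA, YE, WOO, MA])
      | exact absurd h (by simp)

theorem tfF_congr (k : Nat) (f1 : Nat) : ∀ (f2 : Nat) (p w : List Char),
    w.length ≤ f1 → w.length ≤ f2 → tfF k f1 p w = tfF k f2 p w := by
  induction f1 with
  | zero => intro f2 p w h1 _; cases w with
    | nil => cases f2 <;> rfl
    | cons c r => simp at h1
  | succ f ih =>
    intro f2 p w h1 h2
    cases w with
    | nil => cases f2 <;> rfl
    | cons c r =>
      cases f2 with
      | zero => simp at h2
      | succ f2' =>
        simp only [tfF]
        by_cases hc : c = 'X'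
        · simp only [hc]
          exact ih f2' ['X'] r (by simp at h1; omega) (by simp at h2; omega)
        · simp only [if_neg hc]
          cases h : stageSound k c with
          | none => rfl
          | some s =>
            have hs := stageSound_some_pos k c s h
            have hd : ((c :: r).drop s.length).length ≤ f := by
              simp only [List.length_drop, List.length_cons]
              simp at h1; omega
            have hd2 : ((c :: r).drop s.length).length ≤ f2' := by
              simp only [List.length_drop, List.length_cons]
              simp at h2; omega
            simp only [ih f2' s ((c :: r).drop s.length) hd hd2]

theorem tf_nil (k : Nat) (p : List Char) : tf k p [] = true := rfl

theorem tf_cons (k : Nat) (p : List Char) (c : Char) (r : List Char) :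
    tf k p (c :: r) =
      (if c = 'X' then tf k ['X'] r
       else
        match stageSound k c with
        | none => false
        | some s => !(s == p) && s.isPrefixOf (c :: r) && tf k s ((c :: r).drop s.length)) := by
  show tfF k (r.length + 1) p (c :: r) = _
  simp only [tfF]
  by_cases hc : c = 'X'
  · simp [hc]; rfl
  · simp only [if_neg hc]
    cases h : stageSound k c with
    | none => rfl
    | some s =>
      have hs := stageSound_some_pos k c s h
      have := tfF_congr k r.length ((c :: r).drop s.length).length s ((c :: r).drop s.length)
        (by simp; omega) (le_refl _)
      simp only [this]
      rfl

def rep (a : Char) (ts : List Char) : List Char → List Char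
  | [] => []
  | c :: r =>
    if (a :: ts).isPrefixOf (c :: r) then 'X' :: rep a ts (r.drop ts.length)
    else c :: rep a ts r
termination_by w => w.length
decreasing_by
  · simp only [List.length_drop, List.length_cons]; omega
  · simp

theorem replace_go_eq_rep (a : Char) (ts : List Char) (fuel : Nat) :
    ∀ (l acc : List Char), l.length ≤ fuel →
      PySem.Chars.replace.go (a :: ts) ['X'] fuel l acc = acc.reverse ++ rep a ts l := by
  induction fuel with
  | zero =>
    intro l acc h
    cases l with
    | nil => simp [PySem.Chars.replace.go, rep]
    | cons c r => simp at h
  | succ f ih =>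
    intro l acc h
    cases l with
    | nil => simp [PySem.Chars.replace.go, rep]
    | cons c r =>
      rw [PySem.Chars.replace.go]
      by_cases hp : (a :: ts).isPrefixOf (c :: r) = true
      · rw [if_pos hp]
        have hlen : (List.drop (a :: ts).length (c :: r)).length ≤ f := by
          simp only [List.length_drop, List.length_cons] at *; omega
        rw [ih _ _ hlen]
        simp [rep, hp]
      · rw [if_neg hp]
        rw [ih r (c :: acc) (by simp at h ⊢; omega)]
        simp [rep, hp]

theorem replace_eq_rep (a : Char) (ts s : List Char) :
    PySem.Chars.replace s (a :: ts) ['X'] = rep a ts s := by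
  rw [PySem.Chars.replace]
  simp only [List.isEmpty_cons, if_neg]
  exact replace_go_eq_rep a ts s.length s [] (le_refl _)

def hasInf (sub : List Char) : List Char → Bool
  | [] => sub.isPrefixOf []
  | c :: r => sub.isPrefixOf (c :: r) || hasInf sub r

theorem hasInf_iff (sub s : List Char) : hasInf sub s = true ↔ sub <:+: s := by
  induction s with
  | nil => simp [hasInf, List.isPrefixOf_iff_prefix, List.infix_nil, List.prefix_nil]
  | cons c r ih =>
    simp [hasInf, List.infix_cons_iff, ih, List.isPrefixOf_iff_prefix, or_comm]

theorem isIn_eq_hasInf (sub s : List Char) : PySem.Chars.isIn sub s = hasInf sub s := by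
  rw [Bool.eq_iff_iff, PySem.Chars.isIn_iff_infix, hasInf_iff]

theorem count_go_single (x : Char) (fuel : Nat) :
    ∀ (l : List Char) (acc : Nat), l.length ≤ fuel →
      PySem.Chars.count.go [x] fuel l acc = acc + l.count x := by
  induction fuel with
  | zero =>
    intro l acc h
    cases l with
    | nil => simp [PySem.Chars.count.go]
    | cons c r => simp at h
  | succ f ih =>
    intro l acc h
    cases l with
    | nil => simp [PySem.Chars.count.go]
    | cons c r =>
      rw [PySem.Chars.count.go]
      by_cases hp : [x].isPrefixOf (c :: r) = true
      · rw [if_pos hp]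
        have hx : x = c := by simpa [List.isPrefixOf] using hp
        rw [ih _ _ (by simp at h ⊢; omega)]
        subst hx
        simp [List.count_cons]
        omega
      · rw [if_neg hp]
        have hx : ¬ (x = c) := by
          intro hh; exact hp (by simp [List.isPrefixOf, hh])
        rw [ih _ _ (by simp at h ⊢; omega)]
        simp [List.count_cons, Ne.symm hx, hx]

theorem count_single_eq (x : Char) (s : List Char) :
    PySem.Chars.count s [x] = s.count x := by
  rw [PySem.Chars.count]
  simp only [List.isEmpty_cons, if_neg]
  simpa using count_go_single x s.length s 0 (le_refl _)

theorem stageSound4_none (c : Char) : stageSound 4 c = none := by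
  unfold stageSound; split <;> simp

theorem tf4 (w : List Char) : ∀ (p : List Char), tf 4 p w = w.all (· == 'X') := by
  induction w with
  | nil => intro p; rfl
  | cons c r ih =>
    intro p
    rw [tf_cons]
    by_cases hc : c = 'X'
    · simp [hc, ih]
    · simp [hc, stageSound4_none]
      try (intro h; exact absurd h hc)

theorem isPrefixOf_cons_cons (a b : Char) (as bs : List Char) :
    (a :: as).isPrefixOf (b :: bs) = (a == b && as.isPrefixOf bs) := rfl

theorem isPrefixOf_head_ne (a c : Char) (ts r : List Char) (h : a ≠ c) :
    (a :: ts).isPrefixOf (c :: r) = false := by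
  rw [isPrefixOf_cons_cons]
  simp [h]

theorem rep_nil (a : Char) (ts : List Char) : rep a ts [] = [] := by simp [rep]

theorem rep_cons_pos (a : Char) (ts : List Char) (c : Char) (r : List Char)
    (h : (a :: ts).isPrefixOf (c :: r) = true) :
    rep a ts (c :: r) = 'X' :: rep a ts (r.drop ts.length) := by
  simp [rep, h]

theorem rep_cons_neg (a : Char) (ts : List Char) (c : Char) (r : List Char)
    (h : (a :: ts).isPrefixOf (c :: r) = false) :
    rep a ts (c :: r) = c :: rep a ts r := by
  simp [rep, h]

theorem hasInf_nil (sub : List Char) : hasInf sub [] = sub.isPrefixOf [] := rfl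
theorem hasInf_cons (sub : List Char) (c : Char) (r : List Char) :
    hasInf sub (c :: r) = (sub.isPrefixOf (c :: r) || hasInf sub r) := rfl

theorem stage_none_succ (k : Nat) (c : Char) (h : stageSound k c = none) :
    stageSound (k + 1) c = none := by
  unfold stageSound at *
  split <;> split at h <;> simp_all <;> omega

theorem stage3_some (c : Char) (s : List Char) (h : stageSound 3 c = some s) :
    c = 'm' ∧ s = MA := by
  unfold stageSound at h
  split at h <;> (try split at h) <;> simp_all

theorem stage3_none_ne (c : Char) (h : stageSound 3 c = none) : c ≠ 'm' := by
  intro hc; subst hc; simp [stageSound] at h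

theorem SL3 (n : Nat) : ∀ (w : List Char), w.length ≤ n → ∀ (p : List Char),
    tf 3 p w = (!(hasInf (MA ++ MA) w) && !((p == MA) && MA.isPrefixOf w)
      && tf 4 (if p == MA then ['X'] else p) (rep 'm' ['a'] w)) := by
  induction n with
  | zero =>
    intro w hw p
    have : w = [] := by cases w <;> simp_all
    subst this
    simp [tf_nil, hasInf, rep, MA, List.isPrefixOf]
  | succ n ih =>
    intro w hw p
    cases w with
    | nil => simp [tf_nil, hasInf, rep, MA, List.isPrefixOf]
    | cons c r =>
      rw [tf_cons]
      by_cases hc : c = 'X'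
      · subst hc
        have hr : r.length ≤ n := by simp at hw; omega
        rw [ih r hr ['X']]
        simp only [hasInf]
        rw [rep_cons_neg 'm' ['a'] 'X' r (by rfl)]
        rw [tf_cons]
        simp [MA, List.isPrefixOf]
      · rw [if_neg hc]
        cases h : stageSound 3 c with
        | none =>
          have hne := stage3_none_ne c h
          rw [rep_cons_neg 'm' ['a'] c r (isPrefixOf_head_ne _ _ _ _ hne.symm)]
          rw [tf_cons, if_neg hc, stageSound4_none]
          simp
        | some s =>
          obtain ⟨hcm, hsm⟩ := stage3_some c s h
          subst hcm; subst hsm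
          by_cases hp : MA.isPrefixOf ('m' :: r) = true
          · cases r with
            | nil => exact absurd hp (by decide)
            | cons d u =>
              have hd : 'a' = d := by
                rw [show MA.isPrefixOf ('m' :: d :: u) = (('a' == d) && List.isPrefixOf [] u) from rfl] at hp
                simpa using hp
              subst hd
              have hu : u.length ≤ n := by simp at hw; omega
              simp only []
              rw [show (('m' :: 'a' :: u).drop MA.length) = u by simp [MA]]
              rw [ih u hu MA]
              rw [show rep 'm' ['a'] ('m' :: 'a' :: u) = 'X' :: rep 'm' ['a'] u from
                rep_cons_pos 'm' ['a'] 'm' ('a'::u) rfl]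
              rw [tf_cons]
              simp only [hasInf]
              simp only [show (MA ++ MA).isPrefixOf ('m' :: 'a' :: u) = MA.isPrefixOf u from rfl,
                show (MA ++ MA).isPrefixOf ('a' :: u) = false from rfl,
                show MA.isPrefixOf ('m' :: 'a' :: u) = true from rfl]
              by_cases hpm : p = MA
              · subst hpm
                cases h1 : MA.isPrefixOf u <;>
                  cases h2 : hasInf (MA ++ MA) u <;>
                  cases h3 : tf 4 ['X'] (rep 'm' ['a'] u) <;>
                  simp [h1, h2, h3]
              · have hq : (p == MA) = false := by simpa using hpm
                have hq' : (MA == p) = false := by simpa using (Ne.symm hpm)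
                cases h1 : MA.isPrefixOf u <;>
                  cases h2 : hasInf (MA ++ MA) u <;>
                  cases h3 : tf 4 ['X'] (rep 'm' ['a'] u) <;>
                  simp [h1, h2, h3, hq, hq']
          · simp only [Bool.eq_false_iff.mpr (show ¬ MA.isPrefixOf ('m'::r) = true from hp)]
            rw [rep_cons_neg 'm' ['a'] 'm' r (Bool.eq_false_iff.mpr (by exact hp))]
            rw [tf_cons]
            simp [stageSound4_none]

theorem prefix_rep_head (a : Char) (ts : List Char) (r : List Char) (x : Char) (xs : List Char)
    (hx : x ≠ 'X') (hr : ∀ d u, r = d :: u → x ≠ d) :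
    (x :: xs).isPrefixOf (rep a ts r) = false := by
  cases r with
  | nil => rw [rep_nil]; rfl
  | cons d u =>
    by_cases hp : (a :: ts).isPrefixOf (d :: u) = true
    · rw [rep_cons_pos _ _ _ _ hp]; exact isPrefixOf_head_ne _ _ _ _ hx
    · rw [rep_cons_neg _ _ _ _ (Bool.eq_false_iff.mpr hp)]
      exact isPrefixOf_head_ne _ _ _ _ (hr d u rfl)

theorem stage2_some (c : Char) (s : List Char) (h : stageSound 2 c = some s) :
    (c = 'w' ∧ s = WOO) ∨ (c = 'm' ∧ s = MA) := by
  unfold stageSound at h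
  split at h <;> (try split at h) <;> simp_all

theorem stage2_none_ne (c : Char) (h : stageSound 2 c = none) : c ≠ 'w' := by
  intro hc; subst hc; simp [stageSound] at h

theorem SL2 (n : Nat) : ∀ (w : List Char), w.length ≤ n → ∀ (p : List Char),
    tf 2 p w = (!(hasInf (WOO ++ WOO) w) && !((p == WOO) && WOO.isPrefixOf w)
      && tf 3 (if p == WOO then ['X'] else p) (rep 'w' ['o', 'o'] w)) := by
  induction n with
  | zero =>
    intro w hw p
    have : w = [] := by cases w <;> simp_all
    subst this
    simp [tf_nil, hasInf_nil, rep_nil, WOO]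
  | succ n ih =>
    intro w hw p
    cases w with
    | nil => simp [tf_nil, hasInf_nil, rep_nil, WOO]
    | cons c r =>
      rw [tf_cons]
      by_cases hc : c = 'X'
      · subst hc
        rw [ih r (by simp at hw; omega) ['X']]
        rw [hasInf_cons, rep_cons_neg 'w' ['o','o'] 'X' r (by rfl), tf_cons]
        simp [WOO, isPrefixOf_cons_cons]
      · rw [if_neg hc]
        cases h : stageSound 2 c with
        | none =>
          have hne := stage2_none_ne c h
          rw [rep_cons_neg 'w' ['o','o'] c r (isPrefixOf_head_ne _ _ _ _ (Ne.symm hne))]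
          rw [tf_cons, if_neg hc, stage_none_succ 2 c h]
          simp
        | some s =>
          rcases stage2_some c s h with ⟨hcw, hsw⟩ | ⟨hcm, hsm⟩
          · -- c = 'w', s = WOO : the sound being consumed at this stage
            subst hcw; subst hsw
            by_cases hp : WOO.isPrefixOf ('w' :: r) = true
            · cases r with
              | nil => exact absurd hp (by decide)
              | cons d r2 => cases r2 with
                | nil =>
                  rw [show WOO.isPrefixOf ['w', d] = false by
                    rw [show WOO.isPrefixOf ['w', d] = (('o' == d) && false) from rfl]; simp] at hp
                  exact absurd hp (by simp)
                | cons e u =>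
                  have hde : 'o' = d ∧ 'o' = e := by
                    rw [show WOO.isPrefixOf ('w' :: d :: e :: u)
                      = (('o' == d) && (('o' == e) && true)) from rfl] at hp
                    simpa using hp
                  obtain ⟨hd, he⟩ := hde; subst hd; subst he
                  simp only []
                  rw [show (('w' :: 'o' :: 'o' :: u).drop WOO.length) = u from rfl]
                  rw [ih u (by simp at hw; omega) WOO]
                  rw [show rep 'w' ['o','o'] ('w' :: 'o' :: 'o' :: u) = 'X' :: rep 'w' ['o','o'] u from
                    rep_cons_pos 'w' ['o','o'] 'w' ('o'::'o'::u) rfl]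
                  rw [tf_cons]
                  simp only [hasInf_cons]
                  simp only [show (WOO ++ WOO).isPrefixOf ('w' :: 'o' :: 'o' :: u) = WOO.isPrefixOf u from rfl,
                    show (WOO ++ WOO).isPrefixOf ('o' :: 'o' :: u) = false from rfl,
                    show (WOO ++ WOO).isPrefixOf ('o' :: u) = false from rfl,
                    show WOO.isPrefixOf ('w' :: 'o' :: 'o' :: u) = true from rfl]
                  by_cases hpw : p = WOO
                  · subst hpw
                    cases h1 : WOO.isPrefixOf u <;>
                      cases h2 : hasInf (WOO ++ WOO) u <;>
                      cases h3 : tf 3 ['X'] (rep 'w' ['o','o'] u) <;>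
                      simp [h1, h2, h3]
                  · have hq : (p == WOO) = false := by simpa using hpw
                    have hq' : (WOO == p) = false := by simpa using (Ne.symm hpw)
                    cases h1 : WOO.isPrefixOf u <;>
                      cases h2 : hasInf (WOO ++ WOO) u <;>
                      cases h3 : tf 3 ['X'] (rep 'w' ['o','o'] u) <;>
                      simp [h1, h2, h3, hq, hq']
            · simp only [Bool.eq_false_iff.mpr (show ¬ WOO.isPrefixOf ('w'::r) = true from hp)]
              rw [rep_cons_neg 'w' ['o','o'] 'w' r (Bool.eq_false_iff.mpr hp)]
              rw [tf_cons]
              simp [show stageSound 3 'w' = none from rfl]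
          · -- c = 'm', s = MA : a sound still active at the next stage
            subst hcm; subst hsm
            by_cases hp : MA.isPrefixOf ('m' :: r) = true
            · cases r with
              | nil => exact absurd hp (by decide)
              | cons d u =>
                have hd : 'a' = d := by
                  rw [show MA.isPrefixOf ('m' :: d :: u) = (('a' == d) && true) from rfl] at hp
                  simpa using hp
                subst hd
                simp only []
                rw [show (('m' :: 'a' :: u).drop MA.length) = u from rfl]
                rw [ih u (by simp at hw; omega) MA]
                rw [show rep 'w' ['o','o'] ('m' :: 'a' :: u) = 'm' :: 'a' :: rep 'w' ['o','o'] u by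
                  rw [rep_cons_neg _ _ _ _ (by rfl), rep_cons_neg _ _ _ _ (by rfl)]]
                rw [tf_cons]
                simp only [hasInf_cons]
                simp only [show (WOO ++ WOO).isPrefixOf ('m' :: 'a' :: u) = false from rfl,
                  show (WOO ++ WOO).isPrefixOf ('a' :: u) = false from rfl,
                  show WOO.isPrefixOf ('m' :: 'a' :: u) = false from rfl,
                  show stageSound 3 'm' = some MA from rfl]
                rw [show MA.isPrefixOf ('m' :: 'a' :: rep 'w' ['o','o'] u) = true from rfl]
                rw [show (('m' :: 'a' :: rep 'w' ['o','o'] u).drop MA.length) = rep 'w' ['o','o'] u from rfl]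
                have e1 : (MA == WOO) = false := rfl
                have e2 : ¬ MA = WOO := by decide
                have e4 : (MA == ['X']) = false := rfl
                by_cases hpw : p = WOO
                · subst hpw
                  cases h1 : MA.isPrefixOf u <;>
                    cases h2 : hasInf (WOO ++ WOO) u <;>
                    cases h3 : tf 3 MA (rep 'w' ['o','o'] u) <;>
                    simp [h1, h2, h3, e1, e2, e4, hp]
                · have hq : (p == WOO) = false := by simpa using hpw
                  by_cases hpm : p = MA
                  · subst hpm
                    cases h1 : MA.isPrefixOf u <;>
                      cases h2 : hasInf (WOO ++ WOO) u <;>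
                      cases h3 : tf 3 MA (rep 'w' ['o','o'] u) <;>
                      simp [h1, h2, h3, hq, e1, e2, e4, hp]
                  · have hq2 : (MA == p) = false := by simpa using (Ne.symm hpm)
                    cases h1 : MA.isPrefixOf u <;>
                      cases h2 : hasInf (WOO ++ WOO) u <;>
                      cases h3 : tf 3 MA (rep 'w' ['o','o'] u) <;>
                      simp [h1, h2, h3, hq, hq2, e1, e2, e4, hp]
            · simp only [Bool.eq_false_iff.mpr (show ¬ MA.isPrefixOf ('m'::r) = true from hp)]
              rw [rep_cons_neg 'w' ['o','o'] 'm' r (by rfl)]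
              rw [tf_cons]
              simp only [show stageSound 3 'm' = some MA from rfl]
              have htail : ∀ d u, r = d :: u → 'a' ≠ d := by
                intro d u hru had
                subst hru; subst had
                exact hp (by rfl)
              rw [show MA.isPrefixOf ('m' :: rep 'w' ['o','o'] r)
                  = ['a'].isPrefixOf (rep 'w' ['o','o'] r) from rfl,
                prefix_rep_head 'w' ['o','o'] r 'a' [] (by decide) htail]
              simp [hc]

theorem stage1_some (c : Char) (s : List Char) (h : stageSound 1 c = some s) :
    (c = 'y' ∧ s = YE) ∨ (c = 'w' ∧ s = WOO) ∨ (c = 'm' ∧ s = MA) := by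
  unfold stageSound at h
  split at h <;> (try split at h) <;> simp_all

theorem stage1_none_ne (c : Char) (h : stageSound 1 c = none) : c ≠ 'y' := by
  intro hc; subst hc; simp [stageSound] at h

theorem SL1 (n : Nat) : ∀ (w : List Char), w.length ≤ n → ∀ (p : List Char),
    tf 1 p w = (!(hasInf (YE ++ YE) w) && !((p == YE) && YE.isPrefixOf w)
      && tf 2 (if p == YE then ['X'] else p) (rep 'y' ['e'] w)) := by
  induction n with
  | zero =>
    intro w hw p
    have : w = [] := by cases w <;> simp_all
    subst this
    simp [tf_nil, hasInf_nil, rep_nil, YE]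
  | succ n ih =>
    intro w hw p
    cases w with
    | nil => simp [tf_nil, hasInf_nil, rep_nil, YE]
    | cons c r =>
      rw [tf_cons]
      by_cases hc : c = 'X'
      · subst hc
        rw [ih r (by simp at hw; omega) ['X']]
        rw [hasInf_cons, rep_cons_neg 'y' ['e'] 'X' r (by rfl), tf_cons]
        simp [YE, isPrefixOf_cons_cons]
      · rw [if_neg hc]
        cases h : stageSound 1 c with
        | none =>
          have hne := stage1_none_ne c h
          rw [rep_cons_neg 'y' ['e'] c r (isPrefixOf_head_ne _ _ _ _ (Ne.symm hne))]
          rw [tf_cons, if_neg hc, stage_none_succ 1 c h]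
          simp
        | some s =>
          rcases stage1_some c s h with ⟨hcy, hsy⟩ | ⟨hcw, hsw⟩ | ⟨hcm, hsm⟩
          · -- c = 'y', s = YE : the sound being consumed at this stage
            subst hcy; subst hsy
            by_cases hp : YE.isPrefixOf ('y' :: r) = true
            · cases r with
              | nil => exact absurd hp (by decide)
              | cons d u =>
                have hd : 'e' = d := by
                  rw [show YE.isPrefixOf ('y' :: d :: u) = (('e' == d) && true) from rfl] at hp
                  simpa using hp
                subst hd
                simp only []
                rw [show (('y' :: 'e' :: u).drop YE.length) = u from rfl]
                rw [ih u (by simp at hw; omega) YE]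
                rw [show rep 'y' ['e'] ('y' :: 'e' :: u) = 'X' :: rep 'y' ['e'] u from
                  rep_cons_pos 'y' ['e'] 'y' ('e'::u) rfl]
                rw [tf_cons]
                simp only [hasInf_cons]
                simp only [show (YE ++ YE).isPrefixOf ('y' :: 'e' :: u) = YE.isPrefixOf u from rfl,
                  show (YE ++ YE).isPrefixOf ('e' :: u) = false from rfl,
                  show YE.isPrefixOf ('y' :: 'e' :: u) = true from rfl]
                by_cases hpy : p = YE
                · subst hpy
                  cases h1 : YE.isPrefixOf u <;>
                    cases h2 : hasInf (YE ++ YE) u <;>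
                    cases h3 : tf 2 ['X'] (rep 'y' ['e'] u) <;>
                    simp [h1, h2, h3]
                · have hq : (p == YE) = false := by simpa using hpy
                  have hq' : (YE == p) = false := by simpa using (Ne.symm hpy)
                  cases h1 : YE.isPrefixOf u <;>
                    cases h2 : hasInf (YE ++ YE) u <;>
                    cases h3 : tf 2 ['X'] (rep 'y' ['e'] u) <;>
                    simp [h1, h2, h3, hq, hq']
            · simp only [Bool.eq_false_iff.mpr (show ¬ YE.isPrefixOf ('y'::r) = true from hp)]
              rw [rep_cons_neg 'y' ['e'] 'y' r (Bool.eq_false_iff.mpr hp)]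
              rw [tf_cons]
              simp [show stageSound 2 'y' = none from rfl]
          · -- c = 'w', s = WOO : still active at the next stage
            subst hcw; subst hsw
            by_cases hp : WOO.isPrefixOf ('w' :: r) = true
            · cases r with
              | nil => exact absurd hp (by decide)
              | cons d r2 => cases r2 with
                | nil =>
                  rw [show WOO.isPrefixOf ['w', d] = (('o' == d) && false) from rfl] at hp
                  exact absurd hp (by simp)
                | cons e u =>
                  have hde : 'o' = d ∧ 'o' = e := by
                    rw [show WOO.isPrefixOf ('w' :: d :: e :: u)
                      = (('o' == d) && (('o' == e) && true)) from rfl] at hp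
                    simpa using hp
                  obtain ⟨hd, he⟩ := hde; subst hd; subst he
                  simp only []
                  rw [show (('w' :: 'o' :: 'o' :: u).drop WOO.length) = u from rfl]
                  rw [ih u (by simp at hw; omega) WOO]
                  rw [show rep 'y' ['e'] ('w' :: 'o' :: 'o' :: u) = 'w' :: 'o' :: 'o' :: rep 'y' ['e'] u by
                    rw [rep_cons_neg _ _ _ _ (by rfl), rep_cons_neg _ _ _ _ (by rfl),
                      rep_cons_neg _ _ _ _ (by rfl)]]
                  rw [tf_cons]
                  simp only [hasInf_cons]
                  simp only [show (YE ++ YE).isPrefixOf ('w' :: 'o' :: 'o' :: u) = false from rfl,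
                    show (YE ++ YE).isPrefixOf ('o' :: 'o' :: u) = false from rfl,
                    show (YE ++ YE).isPrefixOf ('o' :: u) = false from rfl,
                    show YE.isPrefixOf ('w' :: 'o' :: 'o' :: u) = false from rfl,
                    show stageSound 2 'w' = some WOO from rfl]
                  rw [show WOO.isPrefixOf ('w' :: 'o' :: 'o' :: rep 'y' ['e'] u) = true from rfl]
                  rw [show (('w' :: 'o' :: 'o' :: rep 'y' ['e'] u).drop WOO.length) = rep 'y' ['e'] u from rfl]
                  have e1 : (WOO == YE) = false := rfl
                  have e2 : ¬ WOO = YE := by decide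
                  have e4 : (WOO == ['X']) = false := rfl
                  by_cases hpy : p = YE
                  · subst hpy
                    cases h1 : WOO.isPrefixOf u <;>
                      cases h2 : hasInf (YE ++ YE) u <;>
                      cases h3 : tf 2 WOO (rep 'y' ['e'] u) <;>
                      simp [h1, h2, h3, e1, e2, e4, hp]
                  · have hq : (p == YE) = false := by simpa using hpy
                    by_cases hpw : p = WOO
                    · subst hpw
                      cases h1 : WOO.isPrefixOf u <;>
                        cases h2 : hasInf (YE ++ YE) u <;>
                        cases h3 : tf 2 WOO (rep 'y' ['e'] u) <;>
                        simp [h1, h2, h3, hq, e1, e2, e4, hp]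
                    · have hq2 : (WOO == p) = false := by simpa using (Ne.symm hpw)
                      cases h1 : WOO.isPrefixOf u <;>
                        cases h2 : hasInf (YE ++ YE) u <;>
                        cases h3 : tf 2 WOO (rep 'y' ['e'] u) <;>
                        simp [h1, h2, h3, hq, hq2, e1, e2, e4, hp]
            · simp only [Bool.eq_false_iff.mpr (show ¬ WOO.isPrefixOf ('w'::r) = true from hp)]
              rw [rep_cons_neg 'y' ['e'] 'w' r (by rfl)]
              rw [tf_cons]
              simp only [show stageSound 2 'w' = some WOO from rfl]
              have hwoo : WOO.isPrefixOf ('w' :: rep 'y' ['e'] r)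
                  = ['o','o'].isPrefixOf (rep 'y' ['e'] r) := rfl
              rw [hwoo]
              cases r with
              | nil => rw [rep_nil]; simp [hc]
              | cons d u =>
                by_cases hd : d = 'o'
                · subst hd
                  have hu : ∀ e v, u = e :: v → 'o' ≠ e := by
                    intro e v huv hoe
                    subst huv; subst hoe
                    exact hp (by rfl)
                  rw [rep_cons_neg 'y' ['e'] 'o' u (by rfl)]
                  rw [show (['o','o'] : List Char).isPrefixOf ('o' :: rep 'y' ['e'] u)
                    = ['o'].isPrefixOf (rep 'y' ['e'] u) from rfl]
                  rw [prefix_rep_head 'y' ['e'] u 'o' [] (by decide) hu]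
                  simp [hc]
                · rw [prefix_rep_head 'y' ['e'] (d :: u) 'o' ['o'] (by decide)
                    (by intro e v hev hoe; injection hev with h1 _; subst h1; exact hd hoe.symm)]
                  simp [hc]
          · -- c = 'm', s = MA : still active at the next stage
            subst hcm; subst hsm
            by_cases hp : MA.isPrefixOf ('m' :: r) = true
            · cases r with
              | nil => exact absurd hp (by decide)
              | cons d u =>
                have hd : 'a' = d := by
                  rw [show MA.isPrefixOf ('m' :: d :: u) = (('a' == d) && true) from rfl] at hp
                  simpa using hp
                subst hd
                simp only []
                rw [show (('m' :: 'a' :: u).drop MA.length) = u from rfl]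
                rw [ih u (by simp at hw; omega) MA]
                rw [show rep 'y' ['e'] ('m' :: 'a' :: u) = 'm' :: 'a' :: rep 'y' ['e'] u by
                  rw [rep_cons_neg _ _ _ _ (by rfl), rep_cons_neg _ _ _ _ (by rfl)]]
                rw [tf_cons]
                simp only [hasInf_cons]
                simp only [show (YE ++ YE).isPrefixOf ('m' :: 'a' :: u) = false from rfl,
                  show (YE ++ YE).isPrefixOf ('a' :: u) = false from rfl,
                  show YE.isPrefixOf ('m' :: 'a' :: u) = false from rfl,
                  show stageSound 2 'm' = some MA from rfl]
                rw [show MA.isPrefixOf ('m' :: 'a' :: rep 'y' ['e'] u) = true from rfl]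
                rw [show (('m' :: 'a' :: rep 'y' ['e'] u).drop MA.length) = rep 'y' ['e'] u from rfl]
                have e1 : (MA == YE) = false := rfl
                have e2 : ¬ MA = YE := by decide
                have e4 : (MA == ['X']) = false := rfl
                by_cases hpy : p = YE
                · subst hpy
                  cases h1 : MA.isPrefixOf u <;>
                    cases h2 : hasInf (YE ++ YE) u <;>
                    cases h3 : tf 2 MA (rep 'y' ['e'] u) <;>
                    simp [h1, h2, h3, e1, e2, e4, hp]
                · have hq : (p == YE) = false := by simpa using hpy
                  by_cases hpm : p = MA
                  · subst hpm
                    cases h1 : MA.isPrefixOf u <;>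
                      cases h2 : hasInf (YE ++ YE) u <;>
                      cases h3 : tf 2 MA (rep 'y' ['e'] u) <;>
                      simp [h1, h2, h3, hq, e1, e2, e4, hp]
                  · have hq2 : (MA == p) = false := by simpa using (Ne.symm hpm)
                    cases h1 : MA.isPrefixOf u <;>
                      cases h2 : hasInf (YE ++ YE) u <;>
                      cases h3 : tf 2 MA (rep 'y' ['e'] u) <;>
                      simp [h1, h2, h3, hq, hq2, e1, e2, e4, hp]
            · simp only [Bool.eq_false_iff.mpr (show ¬ MA.isPrefixOf ('m'::r) = true from hp)]
              rw [rep_cons_neg 'y' ['e'] 'm' r (by rfl)]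
              rw [tf_cons]
              simp only [show stageSound 2 'm' = some MA from rfl]
              have htail : ∀ d u, r = d :: u → 'a' ≠ d := by
                intro d u hru had
                subst hru; subst had
                exact hp (by rfl)
              rw [show MA.isPrefixOf ('m' :: rep 'y' ['e'] r)
                  = ['a'].isPrefixOf (rep 'y' ['e'] r) from rfl,
                prefix_rep_head 'y' ['e'] r 'a' [] (by decide) htail]
              simp [hc]

theorem stage0_some (c : Char) (s : List Char) (h : stageSound 0 c = some s) :
    (c = 'a' ∧ s = AYA) ∨ (c = 'y' ∧ s = YE) ∨ (c = 'w' ∧ s = WOO) ∨ (c = 'm' ∧ s = MA) := by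
  unfold stageSound at h
  split at h <;> (try split at h) <;> simp_all

theorem stage0_none_ne (c : Char) (h : stageSound 0 c = none) : c ≠ 'a' := by
  intro hc; subst hc; simp [stageSound] at h

theorem prefix_mono_isPrefixOf (xs ys u : List Char) (hxy : xs <+: ys)
    (h : ys.isPrefixOf u = true) : xs.isPrefixOf u = true := by
  rw [List.isPrefixOf_iff_prefix] at *
  exact hxy.trans h

theorem SL0 (n : Nat) : ∀ (w : List Char), w.length ≤ n → ∀ (p : List Char),
    tf 0 p w = (!(hasInf (AYA ++ AYA) w) && !((p == AYA) && AYA.isPrefixOf w)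
      && tf 1 (if p == AYA then ['X'] else p) (rep 'a' ['y', 'a'] w)) := by
  induction n with
  | zero =>
    intro w hw p
    have : w = [] := by cases w <;> simp_all
    subst this
    simp [tf_nil, hasInf_nil, rep_nil, AYA]
  | succ n ih =>
    intro w hw p
    cases w with
    | nil => simp [tf_nil, hasInf_nil, rep_nil, AYA]
    | cons c r =>
      rw [tf_cons]
      by_cases hc : c = 'X'
      · subst hc
        rw [ih r (by simp at hw; omega) ['X']]
        rw [hasInf_cons, rep_cons_neg 'a' ['y','a'] 'X' r (by rfl), tf_cons]
        simp [AYA, isPrefixOf_cons_cons]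
      · rw [if_neg hc]
        cases h : stageSound 0 c with
        | none =>
          have hne := stage0_none_ne c h
          rw [rep_cons_neg 'a' ['y','a'] c r (isPrefixOf_head_ne _ _ _ _ (Ne.symm hne))]
          rw [tf_cons, if_neg hc, stage_none_succ 0 c h]
          simp
        | some s =>
          rcases stage0_some c s h with ⟨hca, hsa⟩ | ⟨hcy, hsy⟩ | ⟨hcw, hsw⟩ | ⟨hcm, hsm⟩
          · -- c = 'a', s = AYA : the sound being consumed at this stage
            subst hca; subst hsa
            by_cases hp : AYA.isPrefixOf ('a' :: r) = true
            · cases r with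
              | nil => exact absurd hp (by decide)
              | cons d r2 => cases r2 with
                | nil =>
                  rw [show AYA.isPrefixOf ['a', d] = (('y' == d) && false) from rfl] at hp
                  exact absurd hp (by simp)
                | cons e u =>
                  have hde : 'y' = d ∧ 'a' = e := by
                    rw [show AYA.isPrefixOf ('a' :: d :: e :: u)
                      = (('y' == d) && (('a' == e) && true)) from rfl] at hp
                    simpa using hp
                  obtain ⟨hd, he⟩ := hde; subst hd; subst he
                  simp only []
                  rw [show (('a' :: 'y' :: 'a' :: u).drop AYA.length) = u from rfl]
                  rw [show rep 'a' ['y','a'] ('a' :: 'y' :: 'a' :: u) = 'X' :: rep 'a' ['y','a'] u from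
                    rep_cons_pos 'a' ['y','a'] 'a' ('y'::'a'::u) rfl]
                  rw [tf_cons]
                  simp only [hasInf_cons]
                  simp only [show (AYA ++ AYA).isPrefixOf ('a' :: 'y' :: 'a' :: u) = AYA.isPrefixOf u from rfl,
                    show (AYA ++ AYA).isPrefixOf ('y' :: 'a' :: u) = false from rfl,
                    show (AYA ++ AYA).isPrefixOf ('a' :: u)
                      = (['y','a','a','y','a'] : List Char).isPrefixOf u from rfl,
                    show AYA.isPrefixOf ('a' :: 'y' :: 'a' :: u) = true from rfl]
                  by_cases hov : (['y','a','a','y','a'] : List Char).isPrefixOf u = true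
                  · -- overlapping doubled sound: both sides are false
                    cases u with
                    | nil => exact absurd hov (by decide)
                    | cons d1 u1 => cases u1 with
                      | nil =>
                        rw [show (['y','a','a','y','a'] : List Char).isPrefixOf [d1]
                          = (('y' == d1) && false) from rfl] at hov
                        exact absurd hov (by simp)
                      | cons d2 u2 =>
                        have hdd : 'y' = d1 ∧ 'a' = d2 := by
                          rw [show (['y','a','a','y','a'] : List Char).isPrefixOf (d1 :: d2 :: u2)
                            = (('y' == d1) && (('a' == d2) && ['a','y','a'].isPrefixOf u2)) from rfl] at hov
                          simp at hov
                          exact ⟨hov.1, hov.2.1⟩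
                        obtain ⟨hd1, hd2⟩ := hdd; subst hd1; subst hd2
                        rw [show tf 0 AYA ('y' :: 'a' :: u2) = false by
                          rw [tf_cons]
                          simp [show stageSound 0 'y' = some YE from rfl,
                            show YE.isPrefixOf ('y' :: 'a' :: u2) = false from rfl]]
                        simp [hov]
                  · have hovf : (['y','a','a','y','a'] : List Char).isPrefixOf u = false :=
                      Bool.eq_false_iff.mpr hov
                    rw [ih u (by simp at hw; omega) AYA]
                    have e1 : (AYA == AYA) = true := rfl
                    have e4 : (AYA == ['X']) = false := rfl
                    by_cases hpa : p = AYA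
                    · subst hpa
                      cases h1 : AYA.isPrefixOf u <;>
                        cases h2 : hasInf (AYA ++ AYA) u <;>
                        cases h3 : tf 1 ['X'] (rep 'a' ['y','a'] u) <;>
                        simp [h1, h2, h3, e1, e4, hovf]
                    · have hq : (p == AYA) = false := by simpa using hpa
                      have hq' : (AYA == p) = false := by simpa using (Ne.symm hpa)
                      cases h1 : AYA.isPrefixOf u <;>
                        cases h2 : hasInf (AYA ++ AYA) u <;>
                        cases h3 : tf 1 ['X'] (rep 'a' ['y','a'] u) <;>
                        simp [h1, h2, h3, e1, e4, hq, hq', hovf]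
            · simp only [Bool.eq_false_iff.mpr (show ¬ AYA.isPrefixOf ('a'::r) = true from hp)]
              rw [rep_cons_neg 'a' ['y','a'] 'a' r (Bool.eq_false_iff.mpr hp)]
              rw [tf_cons]
              simp [show stageSound 1 'a' = none from rfl]
          · -- c = 'y', s = YE
            subst hcy; subst hsy
            by_cases hp : YE.isPrefixOf ('y' :: r) = true
            · cases r with
              | nil => exact absurd hp (by decide)
              | cons d u =>
                have hd : 'e' = d := by
                  rw [show YE.isPrefixOf ('y' :: d :: u) = (('e' == d) && true) from rfl] at hp
                  simpa using hp
                subst hd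
                simp only []
                rw [show (('y' :: 'e' :: u).drop YE.length) = u from rfl]
                rw [ih u (by simp at hw; omega) YE]
                rw [show rep 'a' ['y','a'] ('y' :: 'e' :: u) = 'y' :: 'e' :: rep 'a' ['y','a'] u by
                  rw [rep_cons_neg _ _ _ _ (by rfl), rep_cons_neg _ _ _ _ (by rfl)]]
                rw [tf_cons]
                simp only [hasInf_cons]
                simp only [show (AYA ++ AYA).isPrefixOf ('y' :: 'e' :: u) = false from rfl,
                  show (AYA ++ AYA).isPrefixOf ('e' :: u) = false from rfl,
                  show AYA.isPrefixOf ('y' :: 'e' :: u) = false from rfl,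
                  show stageSound 1 'y' = some YE from rfl]
                rw [show YE.isPrefixOf ('y' :: 'e' :: rep 'a' ['y','a'] u) = true from rfl]
                rw [show (('y' :: 'e' :: rep 'a' ['y','a'] u).drop YE.length) = rep 'a' ['y','a'] u from rfl]
                have e1 : (YE == AYA) = false := rfl
                have e2 : ¬ YE = AYA := by decide
                have e4 : (YE == ['X']) = false := rfl
                by_cases hpa : p = AYA
                · subst hpa
                  cases h1 : YE.isPrefixOf u <;>
                    cases h2 : hasInf (AYA ++ AYA) u <;>
                    cases h3 : tf 1 YE (rep 'a' ['y','a'] u) <;>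
                    simp [h1, h2, h3, e1, e2, e4, hp]
                · have hq : (p == AYA) = false := by simpa using hpa
                  by_cases hpy : p = YE
                  · subst hpy
                    cases h1 : YE.isPrefixOf u <;>
                      cases h2 : hasInf (AYA ++ AYA) u <;>
                      cases h3 : tf 1 YE (rep 'a' ['y','a'] u) <;>
                      simp [h1, h2, h3, hq, e1, e2, e4, hp]
                  · have hq2 : (YE == p) = false := by simpa using (Ne.symm hpy)
                    cases h1 : YE.isPrefixOf u <;>
                      cases h2 : hasInf (AYA ++ AYA) u <;>
                      cases h3 : tf 1 YE (rep 'a' ['y','a'] u) <;>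
                      simp [h1, h2, h3, hq, hq2, e1, e2, e4, hp]
            · simp only [Bool.eq_false_iff.mpr (show ¬ YE.isPrefixOf ('y'::r) = true from hp)]
              rw [rep_cons_neg 'a' ['y','a'] 'y' r (by rfl)]
              rw [tf_cons]
              simp only [show stageSound 1 'y' = some YE from rfl]
              have htail : ∀ d u, r = d :: u → 'e' ≠ d := by
                intro d u hru hed
                subst hru; subst hed
                exact hp (by rfl)
              rw [show YE.isPrefixOf ('y' :: rep 'a' ['y','a'] r)
                  = ['e'].isPrefixOf (rep 'a' ['y','a'] r) from rfl,
                prefix_rep_head 'a' ['y','a'] r 'e' [] (by decide) htail]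
              simp [hc]
          · -- c = 'w', s = WOO
            subst hcw; subst hsw
            by_cases hp : WOO.isPrefixOf ('w' :: r) = true
            · cases r with
              | nil => exact absurd hp (by decide)
              | cons d r2 => cases r2 with
                | nil =>
                  rw [show WOO.isPrefixOf ['w', d] = (('o' == d) && false) from rfl] at hp
                  exact absurd hp (by simp)
                | cons e u =>
                  have hde : 'o' = d ∧ 'o' = e := by
                    rw [show WOO.isPrefixOf ('w' :: d :: e :: u)
                      = (('o' == d) && (('o' == e) && true)) from rfl] at hp
                    simpa using hp
                  obtain ⟨hd, he⟩ := hde; subst hd; subst he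
                  simp only []
                  rw [show (('w' :: 'o' :: 'o' :: u).drop WOO.length) = u from rfl]
                  rw [ih u (by simp at hw; omega) WOO]
                  rw [show rep 'a' ['y','a'] ('w' :: 'o' :: 'o' :: u) = 'w' :: 'o' :: 'o' :: rep 'a' ['y','a'] u by
                    rw [rep_cons_neg _ _ _ _ (by rfl), rep_cons_neg _ _ _ _ (by rfl),
                      rep_cons_neg _ _ _ _ (by rfl)]]
                  rw [tf_cons]
                  simp only [hasInf_cons]
                  simp only [show (AYA ++ AYA).isPrefixOf ('w' :: 'o' :: 'o' :: u) = false from rfl,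
                    show (AYA ++ AYA).isPrefixOf ('o' :: 'o' :: u) = false from rfl,
                    show (AYA ++ AYA).isPrefixOf ('o' :: u) = false from rfl,
                    show AYA.isPrefixOf ('w' :: 'o' :: 'o' :: u) = false from rfl,
                    show stageSound 1 'w' = some WOO from rfl]
                  rw [show WOO.isPrefixOf ('w' :: 'o' :: 'o' :: rep 'a' ['y','a'] u) = true from rfl]
                  rw [show (('w' :: 'o' :: 'o' :: rep 'a' ['y','a'] u).drop WOO.length) = rep 'a' ['y','a'] u from rfl]
                  have e1 : (WOO == AYA) = false := rfl
                  have e2 : ¬ WOO = AYA := by decide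
                  have e4 : (WOO == ['X']) = false := rfl
                  by_cases hpa : p = AYA
                  · subst hpa
                    cases h1 : WOO.isPrefixOf u <;>
                      cases h2 : hasInf (AYA ++ AYA) u <;>
                      cases h3 : tf 1 WOO (rep 'a' ['y','a'] u) <;>
                      simp [h1, h2, h3, e1, e2, e4, hp]
                  · have hq : (p == AYA) = false := by simpa using hpa
                    by_cases hpw : p = WOO
                    · subst hpw
                      cases h1 : WOO.isPrefixOf u <;>
                        cases h2 : hasInf (AYA ++ AYA) u <;>
                        cases h3 : tf 1 WOO (rep 'a' ['y','a'] u) <;>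
                        simp [h1, h2, h3, hq, e1, e2, e4, hp]
                    · have hq2 : (WOO == p) = false := by simpa using (Ne.symm hpw)
                      cases h1 : WOO.isPrefixOf u <;>
                        cases h2 : hasInf (AYA ++ AYA) u <;>
                        cases h3 : tf 1 WOO (rep 'a' ['y','a'] u) <;>
                        simp [h1, h2, h3, hq, hq2, e1, e2, e4, hp]
            · simp only [Bool.eq_false_iff.mpr (show ¬ WOO.isPrefixOf ('w'::r) = true from hp)]
              rw [rep_cons_neg 'a' ['y','a'] 'w' r (by rfl)]
              rw [tf_cons]
              simp only [show stageSound 1 'w' = some WOO from rfl]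
              rw [show WOO.isPrefixOf ('w' :: rep 'a' ['y','a'] r)
                  = ['o','o'].isPrefixOf (rep 'a' ['y','a'] r) from rfl]
              cases r with
              | nil => rw [rep_nil]; simp [hc]
              | cons d u =>
                by_cases hd : d = 'o'
                · subst hd
                  have hu : ∀ e v, u = e :: v → 'o' ≠ e := by
                    intro e v huv hoe
                    subst huv; subst hoe
                    exact hp (by rfl)
                  rw [rep_cons_neg 'a' ['y','a'] 'o' u (by rfl)]
                  rw [show (['o','o'] : List Char).isPrefixOf ('o' :: rep 'a' ['y','a'] u)
                    = ['o'].isPrefixOf (rep 'a' ['y','a'] u) from rfl]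
                  rw [prefix_rep_head 'a' ['y','a'] u 'o' [] (by decide) hu]
                  simp [hc]
                · rw [prefix_rep_head 'a' ['y','a'] (d :: u) 'o' ['o'] (by decide)
                    (by intro e v hev hoe; injection hev with h1 _; subst h1; exact hd hoe.symm)]
                  simp [hc]
          · -- c = 'm', s = MA : interacts with the trailing 'a' of aya
            subst hcm; subst hsm
            by_cases hp : MA.isPrefixOf ('m' :: r) = true
            · cases r with
              | nil => exact absurd hp (by decide)
              | cons d u =>
                have hd : 'a' = d := by
                  rw [show MA.isPrefixOf ('m' :: d :: u) = (('a' == d) && true) from rfl] at hp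
                  simpa using hp
                subst hd
                simp only []
                rw [show (('m' :: 'a' :: u).drop MA.length) = u from rfl]
                simp only [hasInf_cons]
                simp only [show (AYA ++ AYA).isPrefixOf ('m' :: 'a' :: u) = false from rfl,
                  show (AYA ++ AYA).isPrefixOf ('a' :: u)
                    = (['y','a','a','y','a'] : List Char).isPrefixOf u from rfl,
                  show AYA.isPrefixOf ('m' :: 'a' :: u) = false from rfl]
                by_cases hz : (['y','a'] : List Char).isPrefixOf u = true
                · -- an aya starts right inside the 'ma': both sides are false
                  cases u with
                  | nil => exact absurd hz (by decide)
                  | cons d1 u1 => cases u1 with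
                    | nil =>
                      rw [show (['y','a'] : List Char).isPrefixOf [d1]
                        = (('y' == d1) && false) from rfl] at hz
                      exact absurd hz (by simp)
                    | cons d2 v =>
                      have hdd : 'y' = d1 ∧ 'a' = d2 := by
                        rw [show (['y','a'] : List Char).isPrefixOf (d1 :: d2 :: v)
                          = (('y' == d1) && (('a' == d2) && true)) from rfl] at hz
                        simpa using hz
                      obtain ⟨hd1, hd2⟩ := hdd; subst hd1; subst hd2
                      rw [show tf 0 MA ('y' :: 'a' :: v) = false by
                        rw [tf_cons]
                        simp [show stageSound 0 'y' = some YE from rfl,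
                          show YE.isPrefixOf ('y' :: 'a' :: v) = false from rfl]]
                      rw [show rep 'a' ['y','a'] ('m' :: 'a' :: 'y' :: 'a' :: v)
                          = 'm' :: 'X' :: rep 'a' ['y','a'] v by
                        rw [rep_cons_neg _ _ _ _ (by rfl),
                          rep_cons_pos 'a' ['y','a'] 'a' ('y'::'a'::v) rfl]
                        rfl]
                      rw [tf_cons]
                      simp only [show stageSound 1 'm' = some MA from rfl]
                      rw [show MA.isPrefixOf ('m' :: 'X' :: rep 'a' ['y','a'] v) = false from rfl]
                      simp
                · have hzf : (['y','a'] : List Char).isPrefixOf u = false := Bool.eq_false_iff.mpr hz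
                  have hovf : (['y','a','a','y','a'] : List Char).isPrefixOf u = false := by
                    cases hov : (['y','a','a','y','a'] : List Char).isPrefixOf u
                    · rfl
                    · exact absurd (prefix_mono_isPrefixOf ['y','a'] ['y','a','a','y','a'] u
                        (by decide) hov) (by simp [hzf])
                  rw [ih u (by simp at hw; omega) MA]
                  rw [show rep 'a' ['y','a'] ('m' :: 'a' :: u) = 'm' :: 'a' :: rep 'a' ['y','a'] u by
                    rw [rep_cons_neg _ _ _ _ (by rfl), rep_cons_neg 'a' ['y','a'] 'a' u
                      (by rw [show (('a'::'y'::'a'::[]) : List Char).isPrefixOf ('a' :: u)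
                        = (['y','a'] : List Char).isPrefixOf u from rfl]; exact hzf)]]
                  rw [tf_cons]
                  simp only [show stageSound 1 'm' = some MA from rfl]
                  rw [show MA.isPrefixOf ('m' :: 'a' :: rep 'a' ['y','a'] u) = true from rfl]
                  rw [show (('m' :: 'a' :: rep 'a' ['y','a'] u).drop MA.length) = rep 'a' ['y','a'] u from rfl]
                  have e1 : (MA == AYA) = false := rfl
                  have e2 : ¬ MA = AYA := by decide
                  have e4 : (MA == ['X']) = false := rfl
                  by_cases hpa : p = AYA
                  · subst hpa
                    cases h1 : MA.isPrefixOf u <;>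
                      cases h2 : hasInf (AYA ++ AYA) u <;>
                      cases h3 : tf 1 MA (rep 'a' ['y','a'] u) <;>
                      simp [h1, h2, h3, e1, e2, e4, hp, hovf]
                  · have hq : (p == AYA) = false := by simpa using hpa
                    by_cases hpm : p = MA
                    · subst hpm
                      cases h1 : MA.isPrefixOf u <;>
                        cases h2 : hasInf (AYA ++ AYA) u <;>
                        cases h3 : tf 1 MA (rep 'a' ['y','a'] u) <;>
                        simp [h1, h2, h3, hq, e1, e2, e4, hp, hovf]
                    · have hq2 : (MA == p) = false := by simpa using (Ne.symm hpm)
                      cases h1 : MA.isPrefixOf u <;>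
                        cases h2 : hasInf (AYA ++ AYA) u <;>
                        cases h3 : tf 1 MA (rep 'a' ['y','a'] u) <;>
                        simp [h1, h2, h3, hq, hq2, e1, e2, e4, hp, hovf]
            · simp only [Bool.eq_false_iff.mpr (show ¬ MA.isPrefixOf ('m'::r) = true from hp)]
              rw [rep_cons_neg 'a' ['y','a'] 'm' r (by rfl)]
              rw [tf_cons]
              simp only [show stageSound 1 'm' = some MA from rfl]
              have htail : ∀ d u, r = d :: u → 'a' ≠ d := by
                intro d u hru had
                subst hru; subst had
                exact hp (by rfl)
              rw [show MA.isPrefixOf ('m' :: rep 'a' ['y','a'] r)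
                  = ['a'].isPrefixOf (rep 'a' ['y','a'] r) from rfl,
                prefix_rep_head 'a' ['y','a'] r 'a' [] (by decide) htail]
              simp [hc]

-- ---- bridging B's sound table to the stage-0 table ----
theorem bsound_cases (c : Char) (s : List Char) (h : bsound c = some s) :
    (c = 'a' ∧ s = AYA) ∨ (c = 'y' ∧ s = YE) ∨ (c = 'w' ∧ s = WOO) ∨ (c = 'm' ∧ s = MA) := by
  unfold bsound at h
  split at h <;> simp_all

theorem bsound_none_stage0 (c : Char) (h : bsound c = none) : stageSound 0 c = none := by
  unfold bsound at h
  split at h <;> simp_all [stageSound]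

theorem bsound_some_stage0 (c : Char) (s : List Char) (h : bsound c = some s) :
    stageSound 0 c = some s := by
  rcases bsound_cases c s h with ⟨hc, hs⟩ | ⟨hc, hs⟩ | ⟨hc, hs⟩ | ⟨hc, hs⟩ <;>
    (subst hc; subst hs; rfl)

theorem contains_append_char (s v : List Char) (x : Char) :
    (s ++ v).contains x = (s.contains x || v.contains x) := by
  induction s with
  | nil => simp
  | cons c r ih => by_cases h : c = x <;> simp_all [Bool.or_assoc]

-- ---- B's per-word verdict: the stage-0 tiling test, failing on any literal 'X' ----
theorem main_B (fuel : Nat) : ∀ (w : List Char), w.length ≤ fuel → ∀ (p : List Char),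
    bloopF fuel p w = (tf 0 p w && !(w.contains 'X')) := by
  induction fuel with
  | zero =>
    intro w hw p
    have : w = [] := by cases w <;> simp_all
    subst this; rfl
  | succ fuel ih =>
    intro w hw p
    cases w with
    | nil => rfl
    | cons c r =>
      show (match bsound c with
        | none => false
        | some s =>
          if s = p then false
          else if s.isPrefixOf (c :: r) then bloopF fuel s ((c :: r).drop s.length)
          else false) = _
      cases hb : bsound c with
      | none =>
        by_cases hc : c = 'X'
        · subst hc; simp
        · rw [tf_cons, if_neg hc, bsound_none_stage0 c hb]
          simp
      | some s =>
        have hcs := bsound_cases c s hb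
        have hcx : c ≠ 'X' := by
          rcases hcs with ⟨hc, _⟩ | ⟨hc, _⟩ | ⟨hc, _⟩ | ⟨hc, _⟩ <;> (subst hc; decide)
        rw [tf_cons, if_neg hcx, bsound_some_stage0 c s hb]
        simp only []
        by_cases hsp : s = p
        · simp [hsp]
        · rw [if_neg hsp]
          by_cases hpre : s.isPrefixOf (c :: r) = true
          · obtain ⟨v, hv⟩ := List.isPrefixOf_iff_prefix.mp hpre
            have hdrop : (c :: r).drop s.length = v := by
              rw [← hv, List.drop_left]
            have hslen : 0 < s.length := by
              rcases hcs with ⟨_, hs⟩ | ⟨_, hs⟩ | ⟨_, hs⟩ | ⟨_, hs⟩ <;> (subst hs; decide)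
            have hvlen : v.length ≤ fuel := by
              have := congrArg List.length hv
              simp at this hw
              omega
            have hsx : s.contains 'X' = false := by
              rcases hcs with ⟨_, hs⟩ | ⟨_, hs⟩ | ⟨_, hs⟩ | ⟨_, hs⟩ <;> (subst hs; rfl)
            rw [hpre, hdrop, ih v hvlen s]
            have hcx2 : (c :: r).contains 'X' = v.contains 'X' := by
              rw [← hv, contains_append_char, hsx]
              simp
            rw [hcx2]
            have hspb : (s == p) = false := by simpa using hsp
            simp [hspb]
          · have : s.isPrefixOf (c :: r) = false := Bool.eq_false_iff.mpr hpre
            simp [this]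

-- ---- A's per-word verdict: the stage-0 tiling test ----
theorem replace_AYA (s : List Char) : PySem.Chars.replace s AYA ['X'] = rep 'a' ['y','a'] s :=
  replace_eq_rep 'a' ['y','a'] s
theorem replace_YE (s : List Char) : PySem.Chars.replace s YE ['X'] = rep 'y' ['e'] s :=
  replace_eq_rep 'y' ['e'] s
theorem replace_WOO (s : List Char) : PySem.Chars.replace s WOO ['X'] = rep 'w' ['o','o'] s :=
  replace_eq_rep 'w' ['o','o'] s
theorem replace_MA (s : List Char) : PySem.Chars.replace s MA ['X'] = rep 'm' ['a'] s :=
  replace_eq_rep 'm' ['a'] s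

theorem count_len_iff_all (b : List Char) :
    (PySem.Chars.count b ['X'] = b.length) ↔ (b.all (· == 'X') = true) := by
  rw [count_single_eq, List.count_eq_length, List.all_eq_true]
  constructor
  · intro h x hx; simpa using (h x hx).symm
  · intro h x hx; exact (show x = 'X' by simpa using h x hx).symm

theorem all_false_of_mem (b : List Char) (x : Char) (hx : x ∈ b) (hne : x ≠ 'X') :
    (b.all (· == 'X')) = false := by
  rw [Bool.eq_false_iff]
  intro h
  rw [List.all_eq_true] at h
  exact hne (by simpa using h x hx)

theorem hasInf_all_false (d b : List Char) (x : Char) (hx : x ∈ d) (hne : x ≠ 'X')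
    (h : hasInf d b = true) : (b.all (· == 'X')) = false :=
  all_false_of_mem b x ((hasInf_iff d b).mp h |>.subset hx) hne

theorem tf_chain (w : List Char) :
    tf 0 [] w = (!(hasInf (AYA ++ AYA) w)
      && (!(hasInf (YE ++ YE) (rep 'a' ['y','a'] w))
      && (!(hasInf (WOO ++ WOO) (rep 'y' ['e'] (rep 'a' ['y','a'] w)))
      && (!(hasInf (MA ++ MA) (rep 'w' ['o','o'] (rep 'y' ['e'] (rep 'a' ['y','a'] w))))
      && tf 4 [] (rep 'm' ['a'] (rep 'w' ['o','o'] (rep 'y' ['e'] (rep 'a' ['y','a'] w)))))))) := by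
  rw [SL0 w.length w (le_refl _) []]
  simp only [show (([] : List Char) == AYA) = false from rfl, Bool.false_and, Bool.not_false,
    Bool.true_and, Bool.and_true, Bool.false_eq_true, if_false]
  rw [SL1 _ _ (le_refl _) []]
  simp only [show (([] : List Char) == YE) = false from rfl, Bool.false_and, Bool.not_false,
    Bool.true_and, Bool.and_true, Bool.false_eq_true, if_false]
  rw [SL2 _ _ (le_refl _) []]
  simp only [show (([] : List Char) == WOO) = false from rfl, Bool.false_and, Bool.not_false,
    Bool.true_and, Bool.and_true, Bool.false_eq_true, if_false]
  rw [SL3 _ _ (le_refl _) []]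
  simp only [show (([] : List Char) == MA) = false from rfl, Bool.false_and, Bool.not_false,
    Bool.true_and, Bool.and_true, Bool.false_eq_true, if_false]

theorem main_A (w : List Char) :
    (decide (PySem.Chars.count (aloop [AYA, YE, WOO, MA] w) ['X']
        = (aloop [AYA, YE, WOO, MA] w).length)) = tf 0 [] w := by
  have key : ∀ (b : List Char),
      (decide (PySem.Chars.count b ['X'] = b.length)) = b.all (· == 'X') := by
    intro b
    cases hall : b.all (· == 'X')
    · exact decide_eq_false (fun hc => by rw [(count_len_iff_all b).mp hc] at hall; cases hall)
    · exact decide_eq_true ((count_len_iff_all b).mpr hall)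
  rw [tf_chain w]
  simp only [aloop, isIn_eq_hasInf, replace_AYA, replace_YE, replace_WOO, replace_MA]
  cases h0 : hasInf (AYA ++ AYA) w with
  | true =>
    simp only [if_true, key, Bool.not_true, Bool.false_and]
    exact hasInf_all_false _ _ 'a' (by decide) (by decide) h0
  | false =>
    simp only [Bool.false_eq_true, if_false, Bool.not_false, Bool.true_and]
    cases h1 : hasInf (YE ++ YE) (rep 'a' ['y','a'] w) with
    | true =>
      simp only [if_true, key, Bool.not_true, Bool.false_and]
      exact hasInf_all_false _ _ 'y' (by decide) (by decide) h1
    | false =>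
      simp only [Bool.false_eq_true, if_false, Bool.not_false, Bool.true_and]
      cases h2 : hasInf (WOO ++ WOO) (rep 'y' ['e'] (rep 'a' ['y','a'] w)) with
      | true =>
        simp only [if_true, key, Bool.not_true, Bool.false_and]
        exact hasInf_all_false _ _ 'w' (by decide) (by decide) h2
      | false =>
        simp only [Bool.false_eq_true, if_false, Bool.not_false, Bool.true_and]
        cases h3 : hasInf (MA ++ MA) (rep 'w' ['o','o'] (rep 'y' ['e'] (rep 'a' ['y','a'] w))) with
        | true =>
          simp only [if_true, key, Bool.not_true, Bool.false_and]
          exact hasInf_all_false _ _ 'm' (by decide) (by decide) h3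
        | false =>
          simp only [Bool.false_eq_true, if_false, Bool.not_false, Bool.true_and, aloop]
          rw [key, tf4]

-- ---- counting over the whole list ----
theorem sol_foldl (l : List String) : ∀ (a : Int),
    l.foldl (fun ans bab =>
      let b := aloop [AYA, YE, WOO, MA] bab.toList
      if PySem.Chars.count b ['X'] = b.length then ans + 1 else ans) a
    = a + (l.countP (fun s => tf 0 [] s.toList) : Int) := by
  induction l with
  | nil => intro a; simp
  | cons w l ih =>
    intro a
    have hw : (PySem.Chars.count (aloop [AYA, YE, WOO, MA] w.toList) ['X']
        = (aloop [AYA, YE, WOO, MA] w.toList).length) ↔ tf 0 [] w.toList = true := by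
      rw [← main_A w.toList]
      exact (decide_eq_true_iff).symm
    simp only [List.foldl_cons, List.countP_cons]
    by_cases hc : tf 0 [] w.toList = true
    · rw [if_pos (hw.mpr hc), ih]
      simp [hc]
      try omega
    · rw [if_neg (fun hcc => hc (hw.mp hcc)), ih]
      simp [hc]

theorem sol_eq_countP (babbling : List String) :
    solution babbling = (babbling.countP (fun s => tf 0 [] s.toList) : Int) := by
  rw [solution, sol_foldl]
  simp

theorem alt_foldl (l : List String) : ∀ (a : Int),
    l.foldl (fun ans w => if bloop [] w.toList then ans + 1 else ans) a
    = a + (l.countP (fun s => bloop [] s.toList) : Int) := by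
  induction l with
  | nil => intro a; simp
  | cons w l ih =>
    intro a
    simp only [List.foldl_cons, List.countP_cons]
    by_cases hc : bloop [] w.toList = true
    · rw [if_pos hc, ih]
      simp [hc]
      try omega
    · rw [if_neg (by simpa using hc), ih]
      simp [hc]

theorem alt_eq_countP (babbling : List String) :
    solution_alt babbling = (babbling.countP (fun s => bloop [] s.toList) : Int) := by
  rw [solution_alt, alt_foldl]
  simp

theorem bloop_eq (w : List Char) (p : List Char) :
    bloop p w = (tf 0 p w && !(w.contains 'X')) :=
  main_B w.length w (le_refl _) p

theorem countP_lt {α : Type} (p q : α → Bool) (l : List α)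
    (hpq : ∀ x ∈ l, q x = true → p x = true) (x : α) (hx : x ∈ l)
    (hp : p x = true) (hq : q x = false) : l.countP q < l.countP p := by
  induction l with
  | nil => cases hx
  | cons y l ih =>
    rcases List.mem_cons.mp hx with hxy | hxl
    · subst hxy
      simp only [List.countP_cons, hp, hq, Bool.false_eq_true, if_false, if_true]
      have : l.countP q ≤ l.countP p :=
        List.countP_mono_left (fun z hz => by
          intro hqz
          exact hpq z (List.mem_cons_of_mem _ hz) hqz)
      omega
    · have hrec := ih (fun z hz => hpq z (List.mem_cons_of_mem _ hz)) hxl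
      simp only [List.countP_cons]
      by_cases hqy : q y = true
      · have hpy := hpq y (List.mem_cons_self) hqy
        simp only [hqy, hpy, if_true]
        omega
      · have hqyf : q y = false := Bool.eq_false_iff.mpr hqy
        by_cases hpy : p y = true
        · simp only [hqyf, hpy, Bool.false_eq_true, if_false, if_true]
          omega
        · simp only [hqyf, Bool.eq_false_iff.mpr hpy, Bool.false_eq_true, if_false]
          omega

-- ---- the automaton of D_solution accepts exactly the stage-0 tilings ----
def pOf : Nat → List Char
  | 1 => AYA
  | 2 => YE
  | 3 => WOO
  | 4 => MA
  | _ => ['X']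

theorem dfa_dead (r : List Char) : List.foldl dfaStep 11 r = 11 := by
  induction r with
  | nil => rfl
  | cons c r ih => simpa [dfaStep] using ih

theorem stage0_none_of_chars (c : Char) (ha : c ≠ 'a') (hy : c ≠ 'y') (hw : c ≠ 'w')
    (hm : c ≠ 'm') : stageSound 0 c = none := by
  unfold stageSound
  split <;> simp_all

theorem idxOf7_of_not_mem (c : Char) (h : c ∉ "Xayewom".toList) :
    "Xayewom".toList.idxOf c = 7 := by
  have := List.idxOf_eq_length (l := "Xayewom".toList) (a := c)
  simp_all

theorem dfa_nomem (q : Nat) (c : Char) (h : c ∉ "Xayewom".toList) : dfaStep q c = 11 := by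
  unfold dfaStep
  rw [idxOf7_of_not_mem c h]
  by_cases hq : q ≤ 10
  · interval_cases q <;> rfl
  · rw [List.getD_eq_default _ _ (by simp; omega)]
    rfl

theorem dfaStep_X (L : Nat) (hL : L ≤ 4) : dfaStep L 'X' = 0 := by
  interval_cases L <;> rfl

theorem dfaStep_a (L : Nat) (hL : L ≤ 4) (h1 : ¬ L = 1) : dfaStep L 'a' = 5 := by
  interval_cases L <;> first | rfl | exact absurd rfl h1

theorem dfaStep_y (L : Nat) (hL : L ≤ 4) (h1 : ¬ L = 2) : dfaStep L 'y' = 7 := by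
  interval_cases L <;> first | rfl | exact absurd rfl h1

theorem dfaStep_w (L : Nat) (hL : L ≤ 4) (h1 : ¬ L = 3) : dfaStep L 'w' = 8 := by
  interval_cases L <;> first | rfl | exact absurd rfl h1

theorem dfaStep_m (L : Nat) (hL : L ≤ 4) (h1 : ¬ L = 4) : dfaStep L 'm' = 10 := by
  interval_cases L <;> first | rfl | exact absurd rfl h1

theorem dfa_bound_other (L : Nat) (hL : L ≤ 4) (c : Char) (hc : ¬ c = 'X') (hca : ¬ c = 'a')
    (hcy : ¬ c = 'y') (hcw : ¬ c = 'w') (hcm : ¬ c = 'm') : dfaStep L c = 11 := by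
  by_cases he : c = 'e'
  · subst he; interval_cases L <;> rfl
  · by_cases ho : c = 'o'
    · subst ho; interval_cases L <;> rfl
    · exact dfa_nomem L c (by simp [hc, hca, hcy, hcw, hcm, he, ho])

theorem dfa5 (d : Char) (hd : ¬ d = 'y') : dfaStep 5 d = 11 := by
  by_cases h : d ∈ "Xayewom".toList
  · rcases (by simpa using h : d = 'X' ∨ d = 'a' ∨ d = 'y' ∨ d = 'e' ∨ d = 'w' ∨ d = 'o' ∨ d = 'm')
      with rfl | rfl | rfl | rfl | rfl | rfl | rfl <;> first | rfl | exact absurd rfl hd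
  · exact dfa_nomem 5 d h

theorem dfa6 (d : Char) (hd : ¬ d = 'a') : dfaStep 6 d = 11 := by
  by_cases h : d ∈ "Xayewom".toList
  · rcases (by simpa using h : d = 'X' ∨ d = 'a' ∨ d = 'y' ∨ d = 'e' ∨ d = 'w' ∨ d = 'o' ∨ d = 'm')
      with rfl | rfl | rfl | rfl | rfl | rfl | rfl <;> first | rfl | exact absurd rfl hd
  · exact dfa_nomem 6 d h

theorem dfa7 (d : Char) (hd : ¬ d = 'e') : dfaStep 7 d = 11 := by
  by_cases h : d ∈ "Xayewom".toList
  · rcases (by simpa using h : d = 'X' ∨ d = 'a' ∨ d = 'y' ∨ d = 'e' ∨ d = 'w' ∨ d = 'o' ∨ d = 'm')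
      with rfl | rfl | rfl | rfl | rfl | rfl | rfl <;> first | rfl | exact absurd rfl hd
  · exact dfa_nomem 7 d h

theorem dfa8 (d : Char) (hd : ¬ d = 'o') : dfaStep 8 d = 11 := by
  by_cases h : d ∈ "Xayewom".toList
  · rcases (by simpa using h : d = 'X' ∨ d = 'a' ∨ d = 'y' ∨ d = 'e' ∨ d = 'w' ∨ d = 'o' ∨ d = 'm')
      with rfl | rfl | rfl | rfl | rfl | rfl | rfl <;> first | rfl | exact absurd rfl hd
  · exact dfa_nomem 8 d h

theorem dfa9 (d : Char) (hd : ¬ d = 'o') : dfaStep 9 d = 11 := by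
  by_cases h : d ∈ "Xayewom".toList
  · rcases (by simpa using h : d = 'X' ∨ d = 'a' ∨ d = 'y' ∨ d = 'e' ∨ d = 'w' ∨ d = 'o' ∨ d = 'm')
      with rfl | rfl | rfl | rfl | rfl | rfl | rfl <;> first | rfl | exact absurd rfl hd
  · exact dfa_nomem 9 d h

theorem dfa10 (d : Char) (hd : ¬ d = 'a') : dfaStep 10 d = 11 := by
  by_cases h : d ∈ "Xayewom".toList
  · rcases (by simpa using h : d = 'X' ∨ d = 'a' ∨ d = 'y' ∨ d = 'e' ∨ d = 'w' ∨ d = 'o' ∨ d = 'm')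
      with rfl | rfl | rfl | rfl | rfl | rfl | rfl <;> first | rfl | exact absurd rfl hd
  · exact dfa_nomem 10 d h

theorem dfa_eq (n : Nat) : ∀ (w : List Char), w.length ≤ n → ∀ (L : Nat), L ≤ 4 →
    ((List.foldl dfaStep L w ≤ 4) ↔ tf 0 (pOf L) w = true) := by
  induction n with
  | zero =>
    intro w hw L hL
    have : w = [] := by cases w <;> simp_all
    subst this
    simpa [tf_nil] using hL
  | succ n ih =>
    intro w hw L hL
    cases w with
    | nil => simpa [tf_nil] using hL
    | cons c r =>
      simp only [List.foldl_cons]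
      rw [tf_cons]
      by_cases hc : c = 'X'
      · subst hc
        rw [dfaStep_X L hL, if_pos rfl]
        exact ih r (by simp at hw; omega) 0 (by omega)
      · rw [if_neg hc]
        by_cases hca : c = 'a'
        · subst hca
          rw [show stageSound 0 'a' = some AYA from rfl]
          simp only []
          by_cases hL1 : L = 1
          · subst hL1
            rw [show dfaStep 1 'a' = 11 from rfl, dfa_dead,
              show (AYA == pOf 1) = true from rfl]
            simp
          · rw [dfaStep_a L hL hL1]
            have hne : (AYA == pOf L) = false := by
              interval_cases L <;> simp_all <;> decide
            rw [hne]
            cases r with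
            | nil =>
                simp [dfaStep]
                try (intro hpre; exact absurd hpre (by decide))
            | cons d r2 =>
              simp only [List.foldl_cons]
              by_cases hd : d = 'y'
              · subst hd
                rw [show dfaStep 5 'y' = 6 from rfl]
                cases r2 with
                | nil =>
                simp [dfaStep]
                try (intro hpre; exact absurd hpre (by decide))
                | cons e r3 =>
                  simp only [List.foldl_cons]
                  by_cases he : e = 'a'
                  · subst he
                    rw [show dfaStep 6 'a' = 1 from rfl,
                      show AYA.isPrefixOf ('a' :: 'y' :: 'a' :: r3) = true from rfl,
                      show (('a' :: 'y' :: 'a' :: r3).drop AYA.length) = r3 from rfl]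
                    have := ih r3 (by simp at hw; omega) 1 (by omega)
                    rw [show pOf 1 = AYA from rfl] at this
                    simp [this]
                  · rw [dfa6 e he, dfa_dead]
                    rw [show AYA.isPrefixOf ('a' :: 'y' :: e :: r3)
                      = (('a' == e) && true) from rfl]
                    simp [Ne.symm he]
              · rw [dfa5 d hd, dfa_dead]
                rw [show AYA.isPrefixOf ('a' :: d :: r2)
                  = (('y' == d) && ['a'].isPrefixOf r2) from rfl]
                simp [Ne.symm hd]
        · by_cases hcy : c = 'y'
          · subst hcy
            rw [show stageSound 0 'y' = some YE from rfl]
            simp only []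
            by_cases hL1 : L = 2
            · subst hL1
              rw [show dfaStep 2 'y' = 11 from rfl, dfa_dead,
                show (YE == pOf 2) = true from rfl]
              simp
            · rw [dfaStep_y L hL hL1]
              have hne : (YE == pOf L) = false := by
                interval_cases L <;> simp_all <;> decide
              rw [hne]
              cases r with
              | nil =>
                simp [dfaStep]
                try (intro hpre; exact absurd hpre (by decide))
              | cons d r2 =>
                simp only [List.foldl_cons]
                by_cases hd : d = 'e'
                · subst hd
                  rw [show dfaStep 7 'e' = 2 from rfl,
                    show YE.isPrefixOf ('y' :: 'e' :: r2) = true from rfl,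
                    show (('y' :: 'e' :: r2).drop YE.length) = r2 from rfl]
                  have := ih r2 (by simp at hw; omega) 2 (by omega)
                  rw [show pOf 2 = YE from rfl] at this
                  simp [this]
                · rw [dfa7 d hd, dfa_dead]
                  rw [show YE.isPrefixOf ('y' :: d :: r2) = (('e' == d) && true) from rfl]
                  simp [Ne.symm hd]
          · by_cases hcw : c = 'w'
            · subst hcw
              rw [show stageSound 0 'w' = some WOO from rfl]
              simp only []
              by_cases hL1 : L = 3
              · subst hL1
                rw [show dfaStep 3 'w' = 11 from rfl, dfa_dead,
                  show (WOO == pOf 3) = true from rfl]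
                simp
              · rw [dfaStep_w L hL hL1]
                have hne : (WOO == pOf L) = false := by
                  interval_cases L <;> simp_all <;> decide
                rw [hne]
                cases r with
                | nil =>
                simp [dfaStep]
                try (intro hpre; exact absurd hpre (by decide))
                | cons d r2 =>
                  simp only [List.foldl_cons]
                  by_cases hd : d = 'o'
                  · subst hd
                    rw [show dfaStep 8 'o' = 9 from rfl]
                    cases r2 with
                    | nil =>
                simp [dfaStep]
                try (intro hpre; exact absurd hpre (by decide))
                    | cons e r3 =>
                      simp only [List.foldl_cons]
                      by_cases he : e = 'o'
                      · subst he
                        rw [show dfaStep 9 'o' = 3 from rfl,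
                          show WOO.isPrefixOf ('w' :: 'o' :: 'o' :: r3) = true from rfl,
                          show (('w' :: 'o' :: 'o' :: r3).drop WOO.length) = r3 from rfl]
                        have := ih r3 (by simp at hw; omega) 3 (by omega)
                        rw [show pOf 3 = WOO from rfl] at this
                        simp [this]
                      · rw [dfa9 e he, dfa_dead]
                        rw [show WOO.isPrefixOf ('w' :: 'o' :: e :: r3)
                          = (('o' == e) && true) from rfl]
                        simp [Ne.symm he]
                  · rw [dfa8 d hd, dfa_dead]
                    rw [show WOO.isPrefixOf ('w' :: d :: r2)
                      = (('o' == d) && ['o'].isPrefixOf r2) from rfl]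
                    simp [Ne.symm hd]
            · by_cases hcm : c = 'm'
              · subst hcm
                rw [show stageSound 0 'm' = some MA from rfl]
                simp only []
                by_cases hL1 : L = 4
                · subst hL1
                  rw [show dfaStep 4 'm' = 11 from rfl, dfa_dead,
                    show (MA == pOf 4) = true from rfl]
                  simp
                · rw [dfaStep_m L hL hL1]
                  have hne : (MA == pOf L) = false := by
                    interval_cases L <;> simp_all <;> decide
                  rw [hne]
                  cases r with
                  | nil =>
                simp [dfaStep]
                try (intro hpre; exact absurd hpre (by decide))
                  | cons d r2 =>
                    simp only [List.foldl_cons]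
                    by_cases hd : d = 'a'
                    · subst hd
                      rw [show dfaStep 10 'a' = 4 from rfl,
                        show MA.isPrefixOf ('m' :: 'a' :: r2) = true from rfl,
                        show (('m' :: 'a' :: r2).drop MA.length) = r2 from rfl]
                      have := ih r2 (by simp at hw; omega) 4 (by omega)
                      rw [show pOf 4 = MA from rfl] at this
                      simp [this]
                    · rw [dfa10 d hd, dfa_dead]
                      rw [show MA.isPrefixOf ('m' :: d :: r2) = (('a' == d) && true) from rfl]
                      simp [Ne.symm hd]
              · rw [dfa_bound_other L hL c hc hca hcy hcw hcm,
                  dfa_dead, stage0_none_of_chars c hca hcy hcw hcm]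
                simp

theorem tf0_prev_X_nil (w : List Char) : tf 0 ['X'] w = tf 0 [] w := by
  cases w with
  | nil => rfl
  | cons c r =>
    rw [tf_cons, tf_cons]
    by_cases hc : c = 'X'
    · simp [hc]
    · rw [if_neg hc, if_neg hc]
      cases h : stageSound 0 c with
      | none => rfl
      | some s =>
        rcases stage0_some c s h with ⟨_, hs⟩ | ⟨_, hs⟩ | ⟨_, hs⟩ | ⟨_, hs⟩ <;>
          (subst hs; rfl)

theorem dfa_iff_tf (w : List Char) :
    (List.foldl dfaStep 0 w ≤ 4) ↔ tf 0 [] w = true := by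
  rw [dfa_eq w.length w (le_refl _) 0 (by omega),
    show pOf 0 = ['X'] from rfl, tf0_prev_X_nil]

-- ===== VERDICT (by name: the statement is the Claim_ definition above) =====
theorem solution_spec : Claim_unchanged_solution := by
  intro babbling _ hnd
  rw [sol_eq_countP, alt_eq_countP]
  have hcc : List.countP (fun s => tf 0 [] s.toList) babbling
      = List.countP (fun s => bloop [] s.toList) babbling := by
    apply List.countP_congr
    intro w hw
    rw [Bool.eq_iff_iff]
    rw [bloop_eq]
    cases hX : w.toList.contains 'X' with
    | false => simp
    | true =>
      have hmem : 'X' ∈ w.toList := by simpa using hX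
      have : ¬ tf 0 [] w.toList = true := by
        intro htf
        exact hnd ⟨w, hw, hmem, (dfa_iff_tf w.toList).mpr htf⟩
      simp [Bool.eq_false_iff.mpr this]
  rw [hcc]

theorem solution_changed : Claim_changed_solution := by
  unfold Claim_changed_solution; decide

theorem solution_tight : Claim_exact_solution := by
  intro babbling _ hd
  obtain ⟨w, hw, hmem, hdfa⟩ := hd
  have htf : tf 0 [] w.toList = true := (dfa_iff_tf w.toList).mp hdfa
  rw [sol_eq_countP, alt_eq_countP]
  have hlt : babbling.countP (fun s => bloop [] s.toList)
      < babbling.countP (fun s => tf 0 [] s.toList) := by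
    apply countP_lt _ _ _ _ w hw htf
    · rw [bloop_eq]
      simp [htf, hmem]
    · intro x _ hq
      rw [bloop_eq] at hq
      exact (Bool.and_eq_true _ _).mp hq |>.1
  intro hc
  rw [Int.natCast_inj] at hc
  omega
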